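-- pv_equiv track=rewrite | github.com/avikjis27/GoogleHashCodePractice-2020 | Solution_v5.py | greedySolution
-- ===== SOURCE A (Python) =====
-- def greedySolution(max_required_slice, number_of_slices):
--     pizza_types_orderd_dsc = []
--     ordered_till = 0
--     for index in range(len(number_of_slices)-1, -1, -1):
--         if (ordered_till + number_of_slices[index] <= max_required_slice):
--             ordered_till = ordered_till + number_of_slices[index]
--             pizza_types_orderd_dsc = [index] + pizza_types_orderd_dsc
--         else:
--             break
--     return ordered_till, pizza_types_orderd_dsc
-- ===== SOURCE B (Python) =====
-- def greedySolution(max_required_slice, number_of_slices):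
--     n = len(number_of_slices)
--     # pass 1: running totals of the reversed list
--     sums = []
--     t = 0
--     for v in reversed(number_of_slices):
--         t += v
--         sums.append(t)
--     # pass 2: length of the leading run that stays within the cap
--     k = 0
--     while k < n and sums[k] <= max_required_slice:
--         k += 1
--     return (sums[k - 1] if k else 0), list(range(n - k, n))
-- ===== Notes on version B (the rewrite author's own statement) =====
-- stated objective: alternative
-- what changed: Replaces A's single backward accumulate-with-break loop that prepends indices one by one with a two-stage decomposition: first build all running totals of the reversed list, then take the length k of the leading run within the cap and emit range(n-k, n) directly.
import Mathlib
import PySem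

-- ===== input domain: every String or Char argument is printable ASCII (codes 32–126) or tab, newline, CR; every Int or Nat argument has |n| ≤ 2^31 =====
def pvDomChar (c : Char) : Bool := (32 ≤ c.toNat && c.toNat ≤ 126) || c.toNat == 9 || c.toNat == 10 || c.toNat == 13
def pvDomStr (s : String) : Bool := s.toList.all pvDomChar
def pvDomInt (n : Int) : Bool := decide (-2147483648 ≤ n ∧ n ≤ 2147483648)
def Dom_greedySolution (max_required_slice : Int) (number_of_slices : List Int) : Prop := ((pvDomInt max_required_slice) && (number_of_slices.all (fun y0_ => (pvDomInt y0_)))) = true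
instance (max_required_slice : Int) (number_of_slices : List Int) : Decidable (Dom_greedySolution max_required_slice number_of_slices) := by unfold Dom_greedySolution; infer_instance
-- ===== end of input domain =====

-- ===== PORT A =====
-- A: walk indices len-1 .. 0, accumulate while the cap allows, break otherwise,
-- prepending each taken index.
def greedyLoopA (cap : Int) (xs : List Int) : Nat → Int × List Int → Int × List Int
  | 0, st => st
  | i + 1, (acc, lst) =>
    let v := PySem.List.pyGetD xs (i : Int) 0   -- xs[i], always in range here
    if acc + v ≤ cap then greedyLoopA cap xs i (acc + v, (i : Int) :: lst)
    else (acc, lst)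

def greedySolution (max_required_slice : Int) (number_of_slices : List Int) : Int × List Int :=
  greedyLoopA max_required_slice number_of_slices number_of_slices.length (0, [])

-- ===== PORT B =====
-- B pass 1: running totals of the reversed list (accumulator t, emitted in order)
def runningSums : List Int → Int → List Int
  | [], _ => []
  | v :: rest, t => (t + v) :: runningSums rest (t + v)

-- B pass 2: length of the leading run that stays within the cap
def runLen (cap : Int) : List Int → Nat
  | [] => 0
  | s :: rest => if s ≤ cap then runLen cap rest + 1 else 0

def greedySolution_alt (max_required_slice : Int) (number_of_slices : List Int) : Int × List Int :=
  let n := number_of_slices.length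
  let sums := runningSums number_of_slices.reverse 0
  let k := runLen max_required_slice sums
  ((if k = 0 then 0 else sums.getD (k - 1) 0),
   PySem.List.pyRange ((n : Int) - (k : Int)) (n : Int) 1)

-- ===== PRECONDITION & SPEC =====
def Spec_greedySolution (max_required_slice : Int) (number_of_slices : List Int) (out : Int × List Int) : Prop := out = greedySolution_alt max_required_slice number_of_slices
instance (max_required_slice : Int) (number_of_slices : List Int) (out : Int × List Int) : Decidable (Spec_greedySolution max_required_slice number_of_slices out) := by unfold Spec_greedySolution; infer_instance

-- ===== CLAIM (what is proved, stated in full; the proofs are below) =====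
def Claim_equal_greedySolution : Prop := ∀ (max_required_slice : Int) (number_of_slices : List Int), Dom_greedySolution max_required_slice number_of_slices → Spec_greedySolution max_required_slice number_of_slices (greedySolution max_required_slice number_of_slices)

-- ===== LEMMAS AND PROOFS =====

lemma runLen_le (cap : Int) (sums : List Int) : runLen cap sums ≤ sums.length := by
  induction sums with
  | nil => simp [runLen]
  | cons s rest ih => simp only [runLen]; split <;> simp; omega

lemma length_runningSums (xs : List Int) (t : Int) :
    (runningSums xs t).length = xs.length := by
  induction xs generalizing t with
  | nil => rfl
  | cons v rest ih => simp [runningSums, ih]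

-- loop invariant: A's loop from index i down equals B's two passes on xs.take i
lemma loopA_eq (cap : Int) (xs : List Int) :
    ∀ (i : Nat), i ≤ xs.length → ∀ (acc : Int) (lst : List Int),
    greedyLoopA cap xs i (acc, lst) =
      (let sums := runningSums ((xs.take i).reverse) acc
       let k := runLen cap sums
       ((if k = 0 then acc else sums.getD (k - 1) 0),
        PySem.List.pyRange ((i : Int) - (k : Int)) (i : Int) 1 ++ lst)) := by
  intro i
  induction i with
  | zero =>
    intro _ acc lst
    simp [greedyLoopA, runningSums, runLen, PySem.List.pyRange_one_eq_nil]
  | succ i ih =>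
    intro hle acc lst
    have hi : i < xs.length := by omega
    have htake : (xs.take (i + 1)).reverse = xs[i] :: (xs.take i).reverse := by
      rw [List.take_add_one]
      simp [List.getElem?_eq_getElem hi]
    have hget : PySem.List.pyGetD xs (i : Int) 0 = xs[i] := by
      simp [PySem.List.pyGetD_natCast, List.getD, List.getElem?_eq_getElem hi]
    simp only [greedyLoopA, hget, htake, runningSums]
    by_cases hc : acc + xs[i] ≤ cap
    · simp only [if_pos hc]
      rw [ih (by omega) (acc + xs[i]) ((i : Int) :: lst)]
      set sums' := runningSums ((xs.take i).reverse) (acc + xs[i]) with hs'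
      set k' := runLen cap sums' with hk'
      have hklen : k' ≤ i := by
        have := runLen_le cap sums'
        rw [length_runningSums] at this
        simpa [List.length_take, Nat.min_eq_left (Nat.le_of_lt hi)] using this
      simp only [runLen, if_pos hc, Prod.mk.injEq, ← hk']
      refine ⟨?_, ?_⟩
      · -- first components
        rcases Nat.eq_zero_or_pos k' with h0 | hpos
        · simp [h0]
        · have hne : k' + 1 ≠ 0 := by omega
          have hne' : k' ≠ 0 := by omega
          simp only [if_neg hne, if_neg hne', Nat.add_sub_cancel]
          rcases k' with _ | m
          · omega
          · simp [List.getD]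
      · -- second components
        have hrange : PySem.List.pyRange ((i : Int) + 1 - ((k' : Int) + 1)) ((i : Int) + 1) 1
            = PySem.List.pyRange ((i : Int) - (k' : Int)) ((i : Int)) 1 ++ [(i : Int)] := by
          have : (i : Int) + 1 - ((k' : Int) + 1) = (i : Int) - (k' : Int) := by ring
          rw [this, PySem.List.pyRange_one_succ_right]
          omega
        push_cast
        rw [hrange]
        simp
    · simp only [if_neg hc]
      simp only [runLen, if_neg hc]
      simp [PySem.List.pyRange_one_eq_nil]

-- ===== VERDICT (by name: the statement is the Claim_ definition above) =====
theorem greedySolution_spec : Claim_equal_greedySolution := by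
  intro cap xs _
  show greedySolution cap xs = greedySolution_alt cap xs
  unfold greedySolution greedySolution_alt
  rw [loopA_eq cap xs xs.length (Nat.le_refl _) 0 []]
  simp
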